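-- pv_equiv track=rewrite | github.com/getmanWhy6478/AOIS | analysis/zhegalkin.py | check_linear
-- ===== SOURCE A (Python) =====
-- from typing import List
--
-- def check_linear(func_values: List[int]) -> bool:
--     """Проверяет линейность функции"""
--     n = len(func_values)
--     triangle = [list(func_values)]
--     curr = func_values[:]
--
--     while len(curr) > 1:
--         next_row = [curr[i] ^ curr[i + 1] for i in range(len(curr) - 1)]
--         triangle.append(next_row)
--         curr = next_row
--
--     coeffs = [row[0] for row in triangle]
--
--     for i in range(1, n):
--         if coeffs[i] == 1 and bin(i).count('1') > 1:
--             return False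
--     return True
-- ===== SOURCE B (Python) =====
-- from typing import List
--
-- def check_linear(func_values: List[int]) -> bool:
--     """Проверяет линейность функции"""
--     def sub_xor(mask: int, off: int) -> int:
--         # XOR of func_values[off + t] over all submasks t of mask,
--         # splitting off the lowest set bit of mask
--         if mask == 0:
--             return func_values[off]
--         rest = mask & (mask - 1)   # mask without its lowest set bit
--         low = mask ^ rest          # the lowest set bit
--         return sub_xor(rest, off) ^ sub_xor(rest, off + low)
--
--     for i in range(len(func_values)):
--         if i & (i - 1) and sub_xor(i, 0) == 1:
--             return False
--     return True
-- ===== Notes on version B (the rewrite author's own statement) =====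
-- stated objective: faster
-- what changed: Replaces the O(n^2) XOR difference-triangle (building every row) by computing each needed Zhegalkin/ANF coefficient directly as a XOR over submask indices via lowest-set-bit recursion, skipping coefficients whose index has at most one set bit.
import Mathlib
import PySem

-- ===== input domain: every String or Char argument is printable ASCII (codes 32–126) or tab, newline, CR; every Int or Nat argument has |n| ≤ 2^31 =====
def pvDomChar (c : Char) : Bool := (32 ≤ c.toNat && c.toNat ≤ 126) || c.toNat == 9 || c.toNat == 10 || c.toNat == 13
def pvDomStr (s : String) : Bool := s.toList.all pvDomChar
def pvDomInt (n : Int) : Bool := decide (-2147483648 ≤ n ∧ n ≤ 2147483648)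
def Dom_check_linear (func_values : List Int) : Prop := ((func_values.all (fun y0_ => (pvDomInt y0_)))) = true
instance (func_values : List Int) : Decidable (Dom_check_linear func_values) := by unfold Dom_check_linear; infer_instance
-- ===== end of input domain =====

-- B replaces A's O(n^2) XOR difference-triangle by computing each needed Zhegalkin
-- coefficient directly as a XOR over submask indices (lowest-set-bit recursion): faster.

-- ===== PORT A =====
-- bin(i).count('1') for the nonnegative loop indices i of A (exact there)
def pvBits1 (i : Nat) : Nat :=
  if i = 0 then 0 else i % 2 + pvBits1 (i / 2)

-- next_row = [curr[i] ^ curr[i+1] for i in range(len(curr) - 1)]  (indices always in range)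
def pvNextRow (curr : List Int) : List Int :=
  (List.range (curr.length - 1)).map
    (fun i => PySem.Int.bxor (curr.getD i 0) (curr.getD (i + 1) 0))

-- the while-loop of A: rows appended to `triangle` after the first one
def pvBuildTriangle (curr : List Int) : List (List Int) :=
  if _h : curr.length > 1 then pvNextRow curr :: pvBuildTriangle (pvNextRow curr)
  else []
termination_by curr.length
decreasing_by simp [pvNextRow]; omega

def check_linear (func_values : List Int) : Bool :=
  let n := func_values.length
  let triangle := func_values :: pvBuildTriangle func_values
  -- row[0]; every row is nonempty on the inputs Pre_ admits (func_values ≠ [])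
  let coeffs := triangle.map (fun row => row.getD 0 0)
  -- for i in range(1, n): if coeffs[i] == 1 and bin(i).count('1') > 1: return False
  (List.range' 1 (n - 1)).all
    (fun i => !(coeffs.getD i 0 == 1 && decide (pvBits1 i > 1)))

-- ===== PORT B =====
-- XOR of func_values[off + t] over all submasks t of mask; Source B's locals
-- rest = mask & (mask - 1) and low = mask ^ rest are written inline here
-- (indices are always in range for the calls check_linear_alt makes)
def pvSubXor (func_values : List Int) (mask off : Nat) : Int :=
  if mask = 0 then func_values.getD off 0
  else
    PySem.Int.bxor (pvSubXor func_values (mask &&& (mask - 1)) off)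
      (pvSubXor func_values (mask &&& (mask - 1)) (off + (mask ^^^ (mask &&& (mask - 1)))))
termination_by mask
decreasing_by
  all_goals (have h2 : mask &&& (mask - 1) ≤ mask - 1 := Nat.and_le_right; omega)

def check_linear_alt (func_values : List Int) : Bool :=
  (List.range func_values.length).all
    (fun i => !(decide (i &&& (i - 1) ≠ 0) && (pvSubXor func_values i 0 == 1)))

-- ===== PRECONDITION & SPEC =====
-- A raises IndexError on the empty list (row[0] of the single empty triangle row)
def Pre_check_linear (func_values : List Int) : Prop := func_values ≠ []
instance (func_values : List Int) : Decidable (Pre_check_linear func_values) := by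
  unfold Pre_check_linear; infer_instance

def pvWitness_check_linear : List Int := [0, 1, 1, 0]

def Spec_check_linear (func_values : List Int) (out : Bool) : Prop :=
  out = check_linear_alt func_values
instance (func_values : List Int) (out : Bool) : Decidable (Spec_check_linear func_values out) := by
  unfold Spec_check_linear; infer_instance

-- ===== CLAIM (what is proved, stated in full; the proofs are below) =====
def Claim_equal_check_linear : Prop := ∀ (func_values : List Int), Dom_check_linear func_values → Pre_check_linear func_values → Spec_check_linear func_values (check_linear func_values)

-- ===== LEMMAS AND PROOFS =====

-- ---- XOR algebra on Int (Python two's-complement xor = PySem.Int.bxor) ----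

-- every Int is pvMk s m: pvMk true m = m, pvMk false m = -m-1
def pvMk (s : Bool) (m : Nat) : Int := if s then (m : Int) else -(m : Int) - 1

theorem pvMk_bxor (s t : Bool) (m n : Nat) :
    PySem.Int.bxor (pvMk s m) (pvMk t n) = pvMk (s == t) (m ^^^ n) := by
  cases s <;> cases t <;>
    simp [pvMk, PySem.Int.bxor] <;> omega

theorem pvMk_exists (a : Int) : ∃ s m, a = pvMk s m := by
  by_cases h : 0 ≤ a
  · exact ⟨true, a.toNat, by simp [pvMk]; omega⟩
  · exact ⟨false, (-a - 1).toNat, by simp [pvMk]; omega⟩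

theorem pv_bxor_assoc (a b c : Int) :
    PySem.Int.bxor (PySem.Int.bxor a b) c = PySem.Int.bxor a (PySem.Int.bxor b c) := by
  obtain ⟨s, m, rfl⟩ := pvMk_exists a
  obtain ⟨t, n, rfl⟩ := pvMk_exists b
  obtain ⟨u, k, rfl⟩ := pvMk_exists c
  rw [pvMk_bxor, pvMk_bxor, pvMk_bxor, pvMk_bxor, Nat.xor_assoc]
  cases s <;> cases t <;> cases u <;> rfl

theorem pv_bxor_cancel (x y z : Int) :
    PySem.Int.bxor (PySem.Int.bxor x y) (PySem.Int.bxor y z) = PySem.Int.bxor x z := by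
  rw [pv_bxor_assoc, ← pv_bxor_assoc y y z, PySem.Int.bxor_self]
  have h0 : PySem.Int.bxor (0 : Int) z = z := by
    rw [PySem.Int.bxor_comm]; exact PySem.Int.bxor_zero z
  rw [h0]

-- ---- bit-pair lemmas on Nat ----

theorem pv_and_lt_two (r1 r2 : Nat) (h1 : r1 < 2) (h2 : r2 < 2) : r1 &&& r2 < 2 := by
  interval_cases r1 <;> interval_cases r2 <;> decide

theorem pv_and_pair (a b r1 r2 : Nat) (h1 : r1 < 2) (h2 : r2 < 2) :
    (2 * a + r1) &&& (2 * b + r2) = 2 * (a &&& b) + (r1 &&& r2) := by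
  have hlt := pv_and_lt_two r1 r2 h1 h2
  apply Nat.eq_of_testBit_eq
  intro i
  cases i with
  | zero =>
    rw [Nat.testBit_and, Nat.testBit_zero, Nat.testBit_zero, Nat.testBit_zero]
    have m1 : (2 * a + r1) % 2 = r1 := by omega
    have m2 : (2 * b + r2) % 2 = r2 := by omega
    have m3 : (2 * (a &&& b) + (r1 &&& r2)) % 2 = r1 &&& r2 := by omega
    rw [m1, m2, m3]
    interval_cases r1 <;> interval_cases r2 <;> decide
  | succ i =>
    rw [Nat.testBit_and, Nat.testBit_add_one, Nat.testBit_add_one, Nat.testBit_add_one]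
    have e1 : (2 * a + r1) / 2 = a := by omega
    have e2 : (2 * b + r2) / 2 = b := by omega
    have e3 : (2 * (a &&& b) + (r1 &&& r2)) / 2 = a &&& b := by omega
    rw [e1, e2, e3, Nat.testBit_and]

theorem pv_xor_lt_two (r1 r2 : Nat) (h1 : r1 < 2) (h2 : r2 < 2) : r1 ^^^ r2 < 2 := by
  interval_cases r1 <;> interval_cases r2 <;> decide

theorem pv_xor_pair (a b r1 r2 : Nat) (h1 : r1 < 2) (h2 : r2 < 2) :
    (2 * a + r1) ^^^ (2 * b + r2) = 2 * (a ^^^ b) + (r1 ^^^ r2) := by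
  have hlt := pv_xor_lt_two r1 r2 h1 h2
  apply Nat.eq_of_testBit_eq
  intro i
  cases i with
  | zero =>
    rw [Nat.testBit_xor, Nat.testBit_zero, Nat.testBit_zero, Nat.testBit_zero]
    have m1 : (2 * a + r1) % 2 = r1 := by omega
    have m2 : (2 * b + r2) % 2 = r2 := by omega
    have m3 : (2 * (a ^^^ b) + (r1 ^^^ r2)) % 2 = r1 ^^^ r2 := by omega
    rw [m1, m2, m3]
    interval_cases r1 <;> interval_cases r2 <;> decide
  | succ i =>
    rw [Nat.testBit_xor, Nat.testBit_add_one, Nat.testBit_add_one, Nat.testBit_add_one]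
    have e1 : (2 * a + r1) / 2 = a := by omega
    have e2 : (2 * b + r2) / 2 = b := by omega
    have e3 : (2 * (a ^^^ b) + (r1 ^^^ r2)) / 2 = a ^^^ b := by omega
    rw [e1, e2, e3, Nat.testBit_xor]

theorem pv_odd_and (q : Nat) : (2 * q + 1) &&& (2 * q) = 2 * q := by
  have h := pv_and_pair q q 1 0 (by omega) (by omega)
  simpa [Nat.and_self, show ((1 : Nat) &&& 0) = 0 from rfl] using h

theorem pv_even_and (q : Nat) (hq : q ≠ 0) :
    (2 * q) &&& (2 * q - 1) = 2 * (q &&& (q - 1)) := by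
  have h := pv_and_pair q (q - 1) 0 1 (by omega) (by omega)
  have e : 2 * (q - 1) + 1 = 2 * q - 1 := by omega
  rw [e] at h
  simpa [show ((0 : Nat) &&& 1) = 0 from rfl] using h

theorem pv_odd_xor (q : Nat) : (2 * q + 1) ^^^ (2 * q) = 1 := by
  have h := pv_xor_pair q q 1 0 (by omega) (by omega)
  simpa [Nat.xor_self, show ((1 : Nat) ^^^ 0) = 1 from rfl] using h

theorem pv_even_xor (a b : Nat) : (2 * a) ^^^ (2 * b) = 2 * (a ^^^ b) := by
  have h := pv_xor_pair a b 0 0 (by omega) (by omega)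
  simpa using h

-- lowest set bit: for mask ≠ 0, mask &&& (mask-1) drops it and mask ^^^ rest is it
theorem pv_lowbit (mask : Nat) (h : mask ≠ 0) :
    ∃ b, mask ^^^ (mask &&& (mask - 1)) = 2 ^ b ∧ (mask &&& (mask - 1)) + 2 ^ b = mask := by
  induction mask using Nat.strong_induction_on with
  | _ mask ih =>
  rcases Nat.even_or_odd mask with ⟨q, hq⟩ | ⟨q, hq⟩
  · -- even: mask = 2q, q ≠ 0
    obtain rfl : mask = 2 * q := by omega
    have hq0 : q ≠ 0 := by omega
    obtain ⟨b, hx, hs⟩ := ih q (by omega) hq0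
    refine ⟨b + 1, ?_, ?_⟩
    · rw [pv_even_and q hq0, pv_even_xor, hx, Nat.pow_succ]; ring
    · rw [pv_even_and q hq0, Nat.pow_succ]; omega
  · -- odd: mask = 2q + 1
    obtain rfl : mask = 2 * q + 1 := hq
    rw [show 2 * q + 1 - 1 = 2 * q from rfl, pv_odd_and, pv_odd_xor]
    exact ⟨0, by norm_num, by omega⟩

theorem pvBits1_eq_zero (q : Nat) : pvBits1 q = 0 ↔ q = 0 := by
  induction q using Nat.strong_induction_on with
  | _ q ih =>
  rw [pvBits1]
  by_cases h0 : q = 0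
  · simp [h0]
  · rw [if_neg h0]
    constructor
    · intro hsum
      have hq2 : pvBits1 (q / 2) = 0 := by omega
      have := (ih (q / 2) (by omega)).mp hq2
      omega
    · intro h; exact absurd h h0

-- popcount > 1  ↔  i & (i-1) ≠ 0
theorem pvBits1_gt_one (i : Nat) : pvBits1 i > 1 ↔ i &&& (i - 1) ≠ 0 := by
  induction i using Nat.strong_induction_on with
  | _ i ih =>
  by_cases h0 : i = 0
  · subst h0; simp [pvBits1]
  rcases Nat.even_or_odd i with ⟨q, hq⟩ | ⟨q, hq⟩
  · -- even i = 2q, q ≥ 1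
    obtain rfl : i = 2 * q := by omega
    have hq0 : q ≠ 0 := by omega
    have hb : pvBits1 (2 * q) = pvBits1 q := by
      rw [pvBits1, if_neg h0]
      have e1 : 2 * q % 2 = 0 := by omega
      have e2 : 2 * q / 2 = q := by omega
      rw [e1, e2]; omega
    rw [hb, pv_even_and q hq0, ih q (by omega)]
    omega
  · -- odd i = 2q + 1
    obtain rfl : i = 2 * q + 1 := hq
    have hb : pvBits1 (2 * q + 1) = 1 + pvBits1 q := by
      rw [pvBits1, if_neg h0]
      have e1 : (2 * q + 1) % 2 = 1 := by omega
      have e2 : (2 * q + 1) / 2 = q := by omega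
      rw [e1, e2]
    rw [hb, show 2 * q + 1 - 1 = 2 * q from rfl, pv_odd_and]
    have hz := pvBits1_eq_zero q
    omega

-- ---- the difference operator ----

def pvG (fv : List Int) : Nat → Int := fun j => fv.getD j 0
def pvD (h : Nat → Int) : Nat → Int := fun j => PySem.Int.bxor (h j) (h (j + 1))

theorem pvD_pow2 (b : Nat) (h : Nat → Int) (j : Nat) :
    (pvD^[2 ^ b]) h j = PySem.Int.bxor (h j) (h (j + 2 ^ b)) := by
  induction b generalizing h j with
  | zero => simp [pvD]
  | succ b ihb =>
    have e : 2 ^ (b + 1) = 2 ^ b + 2 ^ b := by rw [Nat.pow_succ]; omega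
    rw [e, Function.iterate_add_apply, ihb, ihb, ihb,
      show j + 2 ^ b + 2 ^ b = j + (2 ^ b + 2 ^ b) by omega]
    exact pv_bxor_cancel _ _ _

theorem pvSubXor_eq_iterate (fv : List Int) (mask off : Nat) :
    pvSubXor fv mask off = (pvD^[mask]) (pvG fv) off := by
  induction mask using Nat.strong_induction_on generalizing off with
  | _ mask ih =>
  rw [pvSubXor]
  by_cases h0 : mask = 0
  · simp [h0, pvG]
  · rw [if_neg h0]
    obtain ⟨b, hx, hs⟩ := pv_lowbit mask h0
    have hpow : 0 < 2 ^ b := Nat.two_pow_pos b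
    have hrest : mask &&& (mask - 1) < mask := by omega
    rw [hx, ih _ hrest, ih _ hrest]
    have hm : mask = 2 ^ b + (mask &&& (mask - 1)) := by omega
    conv_rhs => rw [hm]
    rw [Function.iterate_add_apply, pvD_pow2]

-- ---- the triangle ----

def pvR (fv : List Int) (k : Nat) : List Int :=
  (List.range (fv.length - k)).map (fun j => (pvD^[k]) (pvG fv) j)

theorem pvR_getD (fv : List Int) (k t : Nat) (ht : t < fv.length - k) :
    (pvR fv k).getD t 0 = (pvD^[k]) (pvG fv) t := by
  rw [pvR, List.getD_eq_getElem _ _ (by simpa using ht)]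
  simp

theorem pvR_zero (fv : List Int) : pvR fv 0 = fv := by
  apply List.ext_getElem
  · simp [pvR]
  · intro j h1 h2
    simp only [pvR, List.getElem_map, List.getElem_range, Function.iterate_zero, id_eq, pvG]
    exact (List.getD_eq_getElem fv 0 h2)

theorem pvNextRow_R (fv : List Int) (k : Nat) (_h : fv.length - k > 1) :
    pvNextRow (pvR fv k) = pvR fv (k + 1) := by
  unfold pvNextRow
  rw [show (pvR fv k).length - 1 = fv.length - (k + 1) from by simp [pvR]; omega]
  conv_rhs => rw [pvR]
  apply List.map_congr_left
  intro j hj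
  rw [List.mem_range] at hj
  rw [pvR_getD fv k j (by omega), pvR_getD fv k (j + 1) (by omega),
    Function.iterate_succ_apply']
  rfl

theorem pvTriangle_eq (fv : List Int) (m k : Nat) (hm : m = fv.length - k) (hpos : 0 < m) :
    pvR fv k :: pvBuildTriangle (pvR fv k) = (List.range' k m).map (pvR fv) := by
  induction m generalizing k with
  | zero => omega
  | succ m ih =>
    rw [pvBuildTriangle]
    have hlen : (pvR fv k).length = fv.length - k := by simp [pvR]
    by_cases hm0 : m = 0
    · subst hm0
      rw [dif_neg (by omega)]
      simp [List.range'_succ]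
    · rw [dif_pos (by omega), pvNextRow_R fv k (by omega)]
      rw [List.range'_succ, List.map_cons, ← ih (k + 1) (by omega) (by omega)]

theorem pv_all_congr {α : Type} (l : List α) (p q : α → Bool)
    (h : ∀ x ∈ l, p x = q x) : l.all p = l.all q := by
  induction l with
  | nil => rfl
  | cons a l ihl =>
    simp only [List.all_cons, h a (by simp), ihl (fun x hx => h x (by simp [hx]))]

-- ===== VERDICT (by name: the statement is the Claim_ definition above) =====
theorem check_linear_spec : Claim_equal_check_linear := by
  intro fv _dom hpre
  unfold Spec_check_linear check_linear check_linear_alt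
  have hn : 0 < fv.length := List.length_pos_of_ne_nil hpre
  have htri : fv :: pvBuildTriangle fv = (List.range fv.length).map (pvR fv) := by
    have h0 := pvTriangle_eq fv fv.length 0 (by omega) hn
    rw [pvR_zero] at h0
    rw [h0, List.range_eq_range']
  have hcoeff : ∀ i, i < fv.length →
      ((fv :: pvBuildTriangle fv).map (fun row => row.getD 0 0)).getD i 0 = pvSubXor fv i 0 := by
    intro i hi
    rw [htri, pvSubXor_eq_iterate]
    rw [List.getD_eq_getElem _ _ (by simpa using hi)]
    simp only [List.getElem_map, List.getElem_range]
    exact pvR_getD fv i 0 (by omega)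
  have hsplit : List.range fv.length = 0 :: List.range' 1 (fv.length - 1) := by
    obtain ⟨m, hm⟩ : ∃ m, fv.length = m + 1 := ⟨fv.length - 1, by omega⟩
    rw [hm, List.range_eq_range', List.range'_succ]
    norm_num
  rw [hsplit, List.all_cons]
  simp only [show ((0 : Nat) &&& (0 - 1) ≠ 0) = False by simp, decide_false,
    Bool.false_and, Bool.not_false, Bool.true_and]
  apply pv_all_congr
  intro i hi
  rw [List.mem_range'_1] at hi
  rw [hcoeff i (by omega)]
  rw [show (decide (pvBits1 i > 1)) = (decide (i &&& (i - 1) ≠ 0)) from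
    decide_eq_decide.mpr (pvBits1_gt_one i)]
  rw [Bool.and_comm]
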